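-- pv_equiv track=rewrite | github.com/gfarnadi/FairPSL | problems/performance_review/data/hierachy_generation.py | hierachy_generator
-- ===== SOURCE A (Python) =====
-- import queue
--
-- def hierachy_generator(k, size):
--     index = 0
--     hierachy_dict = {}
--     sub_ordinates_dict = {}
--     employees = []
--     root = 'e'+str(index)
--     index+=1
--     employees.append(root)
--     hierachy_dict[root] = []
--     sub_ordinates_dict[root] = []
--     return_nodes = queue.Queue()
--     return_nodes.put(root)
--     while index<size:
--         node = return_nodes.get()
--         hierachy_dict, sub_ordinates_dict, employees, return_nodes, index = generate_sub_ordinates(hierachy_dict, sub_ordinates_dict, employees, node, return_nodes, k , index)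
--     return hierachy_dict, sub_ordinates_dict, employees, index
--
-- def generate_sub_ordinates(hierachy_dict, sub_ordinates_dict, employees, node, return_nodes, k , index):
--     while len(hierachy_dict[node])<k:
--         node_new = 'e'+str(index)
--         employees.append(node_new)
--         index+=1
--         return_nodes.put(node_new)
--         hierachy_dict[node].append(node_new)
--         hierachy_dict[node_new] = []
--         sub_ordinates_dict[node_new] = [node]
--         for m in sub_ordinates_dict[node]:
--             if m in sub_ordinates_dict[node_new]:continue
--             if m==node_new: continue
--             sub_ordinates_dict[node_new].append(m)
--     return hierachy_dict, sub_ordinates_dict, employees, return_nodes, index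
-- ===== SOURCE B (Python) =====
-- def _ancestors(k, i):
--     anc = []
--     p = i
--     while p > 0:
--         p = (p - 1) // k
--         anc.append('e' + str(p))
--     return anc
--
-- def hierachy_generator(k, size):
--     n = 0 if size <= 1 else -((1 - size) // k)  # number of internal nodes = ceil((size-1)/k)
--     index = 1 + k * n
--     employees = ['e' + str(i) for i in range(index)]
--     hierachy_dict = {}
--     sub_ordinates_dict = {}
--     for i in range(index):
--         if i < n:
--             hierachy_dict['e' + str(i)] = ['e' + str(k * i + j) for j in range(1, k + 1)]
--         else:
--             hierachy_dict['e' + str(i)] = []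
--         sub_ordinates_dict['e' + str(i)] = _ancestors(k, i)
--     return hierachy_dict, sub_ordinates_dict, employees, index
-- ===== Notes on version B (the rewrite author's own statement) =====
-- stated objective: simpler
-- what changed: B drops A's BFS queue simulation entirely: since BFS numbering makes the complete k-ary tree closed-form, B computes the number of internal nodes n = ceil((size-1)/k) and the final index 1+k*n directly, emits each node's children by index arithmetic (children of e_i are e_{k*i+1}..e_{k*i+k}) and each node's ancestor list by walking parents p -> (p-1)//k, instead of growing dictionaries through a queue-driven double loop.
import Mathlib
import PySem

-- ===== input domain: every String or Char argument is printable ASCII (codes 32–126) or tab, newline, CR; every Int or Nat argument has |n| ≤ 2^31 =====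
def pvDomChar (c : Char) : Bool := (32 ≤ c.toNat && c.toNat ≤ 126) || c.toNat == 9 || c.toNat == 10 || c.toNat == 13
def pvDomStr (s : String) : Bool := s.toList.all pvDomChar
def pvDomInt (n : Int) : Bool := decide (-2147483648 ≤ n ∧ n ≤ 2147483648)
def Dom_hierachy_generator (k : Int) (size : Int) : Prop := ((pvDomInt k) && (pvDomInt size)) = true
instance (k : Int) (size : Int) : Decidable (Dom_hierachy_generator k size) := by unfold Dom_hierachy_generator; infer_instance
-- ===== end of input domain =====

-- B replaces A's BFS queue simulation by closed-form indexing of the complete k-ary tree (simpler, no queue).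

-- shared by both ports: the node name 'e'+str(i)
def ename (i : Int) : String := "e" ++ PySem.Int.toStr i

-- ===== PORT A =====
-- inner while-loop of generate_sub_ordinates; fuel is a totality guard only
-- (the loop adds one child per pass until the node has k children, so k.toNat+1 passes always suffice)
def genSubLoop (k : Int) : Nat → PySem.Dict String (List String) → PySem.Dict String (List String) →
    List String → String → List String → Int →
    PySem.Dict String (List String) × PySem.Dict String (List String) × List String × List String × Int
  | 0, hd, sd, emps, _node, q, index => (hd, sd, emps, q, index)
  | fuel+1, hd, sd, emps, node, q, index =>
    if ((hd.getD node []).length : Int) < k then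
      let node_new := ename index
      let emps := emps ++ [node_new]
      let index := index + 1
      let q := q ++ [node_new]
      let hd := hd.insert node (hd.getD node [] ++ [node_new])
      let hd := hd.insert node_new []
      let sd := sd.insert node_new [node]
      let sd := (sd.getD node []).foldl (fun sd m =>
          if m ∈ sd.getD node_new [] then sd
          else if m = node_new then sd
          else sd.insert node_new (sd.getD node_new [] ++ [m])) sd
      genSubLoop k fuel hd sd emps node q index
    else (hd, sd, emps, q, index)

def generate_sub_ordinates (hd sd : PySem.Dict String (List String)) (emps : List String)
    (node : String) (q : List String) (k index : Int) :
    PySem.Dict String (List String) × PySem.Dict String (List String) × List String × List String × Int :=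
  genSubLoop k (k.toNat + 1) hd sd emps node q index

-- outer while-loop; fuel is a totality guard only (index grows each pass while index < size);
-- the empty-queue case is where Python's queue.get blocks forever — excluded by Pre_
def hgLoop (k size : Int) : Nat → PySem.Dict String (List String) → PySem.Dict String (List String) →
    List String → List String → Int →
    PySem.Dict String (List String) × PySem.Dict String (List String) × List String × Int
  | 0, hd, sd, emps, _q, index => (hd, sd, emps, index)
  | fuel+1, hd, sd, emps, q, index =>
    if index < size then
      match q with
      | [] => (hd, sd, emps, index)
      | node :: q =>
        let r := generate_sub_ordinates hd sd emps node q k index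
        hgLoop k size fuel r.1 r.2.1 r.2.2.1 r.2.2.2.1 r.2.2.2.2
    else (hd, sd, emps, index)

def hierachy_generator (k : Int) (size : Int) :
    (List (String × List String)) × (List (String × List String)) × List String × Int :=
  let index : Int := 0
  let root := ename index
  let index := index + 1
  let emps := [root]
  let hd := (PySem.Dict.empty : PySem.Dict String (List String)).insert root []
  let sd := (PySem.Dict.empty : PySem.Dict String (List String)).insert root []
  let q := [root]
  let r := hgLoop k size (size.toNat + 1) hd sd emps q index
  (r.1.items, r.2.1.items, r.2.2.1, r.2.2.2)

-- ===== PORT B =====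
-- _ancestors(k, i): walk parents p = (p-1)//k up to the root; fuel i.toNat is a totality guard
-- (each step strictly decreases p for k ≥ 1)
def ancWalk (k : Int) : Nat → Int → List String
  | 0, _ => []
  | fuel+1, p =>
    if 0 < p then
      let p' := PySem.Int.floordiv (p - 1) k
      ename p' :: ancWalk k fuel p'
    else []

def ancestors (k i : Int) : List String := ancWalk k i.toNat i

def hierachy_generator_alt (k : Int) (size : Int) :
    (List (String × List String)) × (List (String × List String)) × List String × Int :=
  let n : Int := if size ≤ 1 then 0 else -(PySem.Int.floordiv (1 - size) k)
  let index : Int := 1 + k * n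
  let employees := (PySem.List.pyRange 0 index 1).map (fun i => ename i)
  let hdsd := (PySem.List.pyRange 0 index 1).foldl
      (fun (st : PySem.Dict String (List String) × PySem.Dict String (List String)) i =>
        let hd := if i < n then
            st.1.insert (ename i) ((PySem.List.pyRange 1 (k+1) 1).map (fun j => ename (k*i+j)))
          else st.1.insert (ename i) []
        let sd := st.2.insert (ename i) (ancestors k i)
        (hd, sd)) (PySem.Dict.empty, PySem.Dict.empty)
  (hdsd.1.items, hdsd.2.items, employees, index)

-- ===== PRECONDITION & SPEC =====
-- Pre_ excludes k ≤ 0 with size > 1: there A never returns (queue.get on an empty queue blocks forever).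
def Pre_hierachy_generator (k : Int) (size : Int) : Prop := 1 ≤ k ∨ size ≤ 1
instance (k : Int) (size : Int) : Decidable (Pre_hierachy_generator k size) := by
  unfold Pre_hierachy_generator; infer_instance

def pvWitness_hierachy_generator : Int × Int := (2, 6)

def Spec_hierachy_generator (k : Int) (size : Int) (out : (List (String × List String)) × (List (String × List String)) × List String × Int) : Prop := out = hierachy_generator_alt k size
instance (k : Int) (size : Int) (out : (List (String × List String)) × (List (String × List String)) × List String × Int) : Decidable (Spec_hierachy_generator k size out) := by unfold Spec_hierachy_generator; infer_instance

-- ===== CLAIM (what is proved, stated in full; the proofs are below) =====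
def Claim_equal_hierachy_generator : Prop := ∀ (k : Int) (size : Int), Dom_hierachy_generator k size → Pre_hierachy_generator k size → Spec_hierachy_generator k size (hierachy_generator k size)

-- ===== LEMMAS AND PROOFS =====

-- ---- injectivity of ename on nonnegative indices ----
lemma tdcAppend (b : Nat) : ∀ (f n : Nat) (ds : List Char),
    Nat.toDigitsCore b f n ds = Nat.toDigitsCore b f n [] ++ ds := by
  intro f
  induction f with
  | zero => intro n ds; simp [Nat.toDigitsCore]
  | succ f ih =>
    intro n ds
    simp only [Nat.toDigitsCore]
    by_cases h : n / b = 0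
    · simp [h]
    · simp only [h, if_false]
      rw [ih (n / b) (Nat.digitChar (n % b) :: ds), ih (n / b) [Nat.digitChar (n % b)]]
      simp

lemma tdcNeNil (b n : Nat) : ∀ (f : Nat), 0 < f → Nat.toDigitsCore b f n [] ≠ [] := by
  intro f hf
  match f, hf with
  | f + 1, _ =>
    simp only [Nat.toDigitsCore]
    by_cases h : n / b = 0
    · simp [h]
    · simp only [h, if_false]
      rw [tdcAppend]
      simp

lemma digitCharInj (d e : Nat) (hd : d < 10) (he : e < 10)
    (h : Nat.digitChar d = Nat.digitChar e) : d = e := by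
  interval_cases d <;> interval_cases e <;> revert h <;> decide

lemma tdcInj : ∀ (f g n m : Nat), n < f → m < g →
    Nat.toDigitsCore 10 f n [] = Nat.toDigitsCore 10 g m [] → n = m := by
  intro f
  induction f with
  | zero => intro g n m h; omega
  | succ f ih =>
    intro g n m hn hm heq
    match g, hm with
    | g + 1, hm =>
      simp only [Nat.toDigitsCore] at heq
      by_cases h1 : n / 10 = 0 <;> by_cases h2 : m / 10 = 0
      · simp only [h1, h2, if_true] at heq
        have h3 : n % 10 = m % 10 :=
          digitCharInj _ _ (Nat.mod_lt _ (by norm_num)) (Nat.mod_lt _ (by norm_num))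
            (List.cons.injEq .. ▸ heq).1
        omega
      · exfalso
        simp only [h1, h2, if_true, if_false] at heq
        rw [tdcAppend] at heq
        have hlen := congrArg List.length heq
        simp only [List.length_append, List.length_cons, List.length_nil] at hlen
        have h0 : (Nat.toDigitsCore 10 g (m / 10) []).length = 0 := by omega
        exact tdcNeNil 10 (m / 10) g (by omega) (List.length_eq_zero_iff.mp h0)
      · exfalso
        simp only [h1, h2, if_true, if_false] at heq
        rw [tdcAppend] at heq
        have hlen := congrArg List.length heq
        simp only [List.length_append, List.length_cons, List.length_nil] at hlen
        have h0 : (Nat.toDigitsCore 10 f (n / 10) []).length = 0 := by omega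
        exact tdcNeNil 10 (n / 10) f (by omega) (List.length_eq_zero_iff.mp h0)
      · simp only [h1, h2, if_false] at heq
        rw [tdcAppend 10 f (n / 10), tdcAppend 10 g (m / 10)] at heq
        have hrev := congrArg List.reverse heq
        simp only [List.reverse_append, List.reverse_cons, List.reverse_nil,
          List.nil_append, List.cons_append] at hrev
        have hhead : Nat.digitChar (n % 10) = Nat.digitChar (m % 10) :=
          (List.cons.injEq .. ▸ hrev).1
        have htail : Nat.toDigitsCore 10 f (n / 10) [] = Nat.toDigitsCore 10 g (m / 10) [] := by
          have := (List.cons.injEq .. ▸ hrev).2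
          have := congrArg List.reverse this
          simpa using this
        have hd1 : n / 10 = m / 10 := by
          apply ih g (n / 10) (m / 10) _ _ htail
          · omega
          · omega
        have hd2 : n % 10 = m % 10 :=
          digitCharInj _ _ (Nat.mod_lt _ (by norm_num)) (Nat.mod_lt _ (by norm_num)) hhead
        omega

lemma ename_inj (i j : Int) (hi : 0 ≤ i) (hj : 0 ≤ j) (h : ename i = ename j) : i = j := by
  have h' := congrArg String.toList h
  simp only [ename, String.toList_append, PySem.Int.toList_toStr] at h'
  have h'' : PySem.Int.toChars i = PySem.Int.toChars j := by
    have : ("e".toList ++ PySem.Int.toChars i) = ("e".toList ++ PySem.Int.toChars j) := h'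
    simpa using this
  simp only [PySem.Int.toChars, if_neg (by omega : ¬ i < 0), if_neg (by omega : ¬ j < 0)] at h''
  simp only [Nat.toDigits] at h''
  have := tdcInj (i.toNat + 1) (j.toNat + 1) i.toNat j.toNat (by omega) (by omega) h''
  omega

-- ---- the uniform dictionary shape both runs produce ----
def mkD (f : Int → List String) (b : Int) : PySem.Dict String (List String) :=
  PySem.Dict.mk ((PySem.List.pyRange 0 b 1).map (fun i => (ename i, f i)))

def childPre (k m j : Int) : List String :=
  (PySem.List.pyRange 1 (j+1) 1).map (fun t => ename (k*m+t))

def hfA (k m j : Int) (i : Int) : List String :=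
  if i < m then childPre k i k else if i = m then childPre k m j else []

def hfB (k n : Int) (i : Int) : List String := if i < n then childPre k i k else []

def Nint (k size : Int) : Int := if size ≤ 1 then 0 else -(PySem.Int.floordiv (1 - size) k)

lemma keys_mkD (f : Int → List String) (b : Int) :
    (mkD f b).keys = (PySem.List.pyRange 0 b 1).map ename := by
  simp [mkD, PySem.Dict.keys, List.map_map]

lemma nodup_keys_mkD (f : Int → List String) (b : Int) : (mkD f b).keys.Nodup := by
  rw [keys_mkD]
  apply List.Nodup.map_on
  · intro x hx y hy hxy
    rw [PySem.List.mem_pyRange_one] at hx hy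
    exact ename_inj x y hx.1 hy.1 hxy
  · exact PySem.List.nodup_pyRange_one 0 b

lemma get?_mkD (f : Int → List String) (b x : Int) (hx : 0 ≤ x) (hxb : x < b) :
    (mkD f b).get? (ename x) = some (f x) := by
  apply PySem.Dict.get?_of_mem_items
  · exact List.mem_map.mpr ⟨x, PySem.List.mem_pyRange_one.mpr ⟨hx, hxb⟩, rfl⟩
  · exact nodup_keys_mkD f b

lemma getD_mkD (f : Int → List String) (b x : Int) (d0 : List String) (hx : 0 ≤ x) (hxb : x < b) :
    (mkD f b).getD (ename x) d0 = f x := by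
  exact PySem.Dict.getD_of_get?_eq_some _ _ (get?_mkD f b x hx hxb)

lemma contains_mkD_false (f : Int → List String) (b x : Int) (hx : 0 ≤ x) (hbx : b ≤ x) :
    (mkD f b).contains (ename x) = false := by
  rw [PySem.Dict.contains_eq_decide_mem_keys, keys_mkD]
  simp only [decide_eq_false_iff_not]
  intro hmem
  obtain ⟨i, hi, heq⟩ := List.mem_map.mp hmem
  rw [PySem.List.mem_pyRange_one] at hi
  have := ename_inj i x hi.1 hx heq
  omega

lemma insert_mkD_mem (f : Int → List String) (b x : Int) (v : List String)
    (hx : 0 ≤ x) (hxb : x < b) :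
    (mkD f b).insert (ename x) v = mkD (fun i => if i = x then v else f i) b := by
  apply PySem.Dict.ext
  rw [PySem.Dict.items_insert_of_contains]
  · show ((PySem.List.pyRange 0 b 1).map (fun i => (ename i, f i))).map _ =
      (PySem.List.pyRange 0 b 1).map _
    rw [List.map_map]
    apply List.map_congr_left
    intro i hi
    rw [PySem.List.mem_pyRange_one] at hi
    by_cases hix : i = x
    · subst hix
      simp
    · have hne : ename i ≠ ename x := fun hc => hix (ename_inj i x hi.1 hx hc)
      simp [Function.comp, hne, hix]
  · rw [PySem.Dict.contains_iff_mem_keys, keys_mkD]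
    exact List.mem_map.mpr ⟨x, PySem.List.mem_pyRange_one.mpr ⟨hx, hxb⟩, rfl⟩

lemma insert_mkD_top (f : Int → List String) (b : Int) (v : List String) (hb : 0 ≤ b) :
    (mkD f b).insert (ename b) v = mkD (fun i => if i = b then v else f i) (b+1) := by
  apply PySem.Dict.ext
  rw [PySem.Dict.items_insert_of_not_contains]
  · show ((PySem.List.pyRange 0 b 1).map (fun i => (ename i, f i))) ++ [(ename b, v)] =
      (PySem.List.pyRange 0 (b+1) 1).map _
    rw [PySem.List.pyRange_one_succ_right (by omega : (0:Int) ≤ b), List.map_append]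
    congr 1
    · apply List.map_congr_left
      intro i hi
      rw [PySem.List.mem_pyRange_one] at hi
      simp [show i ≠ b by omega]
    · simp
  · exact contains_mkD_false f b b hb le_rfl

lemma mkD_congr (f g : Int → List String) (b : Int)
    (h : ∀ i, 0 ≤ i → i < b → f i = g i) : mkD f b = mkD g b := by
  apply PySem.Dict.ext
  show (PySem.List.pyRange 0 b 1).map _ = (PySem.List.pyRange 0 b 1).map _
  apply List.map_congr_left
  intro i hi
  rw [PySem.List.mem_pyRange_one] at hi
  rw [h i hi.1 hi.2]

lemma insert_self_eq (d : PySem.Dict String (List String)) (key : String) (v : List String)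
    (hnd : d.keys.Nodup) (h : d.get? key = some v) : d.insert key v = d := by
  apply PySem.Dict.ext
  rw [PySem.Dict.items_insert_of_contains]
  · conv_rhs => rw [← List.map_id d.items]
    apply List.map_congr_left
    intro p hp
    by_cases hpk : p.1 = key
    · have hv : d.get? p.1 = some p.2 := PySem.Dict.get?_of_mem_items d (by simpa using hp) hnd
      rw [hpk, h] at hv
      have : p = (key, v) := Prod.ext hpk (Option.some.inj hv).symm
      simp [this]
    · simp [hpk]
  · rw [PySem.Dict.contains_eq_isSome_get?, h]; rfl

-- the for-loop copying node's ancestor list into node_new's: every element is appended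
lemma foldl_subAppend (nn : String) : ∀ (l : List String) (d : PySem.Dict String (List String))
    (acc : List String), d.keys.Nodup → d.get? nn = some acc → l.Nodup →
    (∀ x ∈ l, x ∉ acc) → (∀ x ∈ l, x ≠ nn) →
    l.foldl (fun sd m => if m ∈ sd.getD nn [] then sd else if m = nn then sd
      else sd.insert nn (sd.getD nn [] ++ [m])) d = d.insert nn (acc ++ l) := by
  intro l
  induction l with
  | nil =>
    intro d acc hnd h _ _ _
    simpa using (insert_self_eq d nn acc hnd h).symm
  | cons x l ih =>
    intro d acc hnd h hnod hacc hnn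
    have hgetD : d.getD nn [] = acc := PySem.Dict.getD_of_get?_eq_some _ _ h
    simp only [List.foldl_cons, hgetD]
    rw [if_neg (hacc x (by simp)), if_neg (hnn x (by simp))]
    rw [ih (d.insert nn (acc ++ [x])) (acc ++ [x])]
    · rw [PySem.Dict.insert_insert_self (d := d)]
      congr 1
      simp
    · exact PySem.Dict.nodup_keys_insert d nn (acc ++ [x]) hnd
    · exact PySem.Dict.get?_insert_self _ _ _
    · exact (List.nodup_cons.mp hnod).2
    · intro y hy
      simp only [List.mem_append, List.mem_singleton]
      rintro (hy1 | hy2)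
      · exact hacc y (by simp [hy]) hy1
      · exact (List.nodup_cons.mp hnod).1 (hy2 ▸ hy)
    · intro y hy
      exact hnn y (by simp [hy])

-- ---- childPre facts ----
lemma childPre_zero (k m : Int) : childPre k m 0 = [] := by
  simp [childPre, PySem.List.pyRange_one_eq_nil]

lemma length_childPre (k m j : Int) (hj : 0 ≤ j) : (childPre k m j).length = j.toNat := by
  simp only [childPre, List.length_map, PySem.List.length_pyRange_one]
  omega

lemma childPre_snoc (k m j : Int) (hj : 0 ≤ j) :
    childPre k m j ++ [ename (1 + k*m + j)] = childPre k m (j+1) := by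
  simp only [childPre]
  rw [show (j + 1 + 1 : Int) = (j + 1) + 1 by ring,
    PySem.List.pyRange_one_succ_right (by omega : (1:Int) ≤ j + 1), List.map_append]
  congr 1
  simp only [List.map_cons, List.map_nil]
  congr 2
  ring

-- ---- ancestors facts (k ≥ 1) ----
lemma parent_bounds (k i : Int) (hk : 1 ≤ k) (hi : 0 < i) :
    0 ≤ PySem.Int.floordiv (i-1) k ∧ PySem.Int.floordiv (i-1) k ≤ i - 1 := by
  rw [PySem.Int.floordiv_eq_ediv_of_pos (by omega)]
  constructor
  · exact Int.ediv_nonneg (by omega) (by omega)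
  · exact le_trans (Int.ediv_le_self _ (by omega)) le_rfl

lemma ancWalk_fuel (k : Int) (hk : 1 ≤ k) : ∀ (f1 : Nat) (i : Int) (f2 : Nat),
    i.toNat ≤ f1 → i.toNat ≤ f2 → ancWalk k f1 i = ancWalk k f2 i := by
  intro f1
  induction f1 with
  | zero =>
    intro i f2 h1 _
    have hi : ¬ 0 < i := by omega
    cases f2 with
    | zero => rfl
    | succ f2 => simp [ancWalk, hi]
  | succ f1 ih =>
    intro i f2 h1 h2
    by_cases hi : 0 < i
    · cases f2 with
      | zero => omega
      | succ f2 =>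
        simp only [ancWalk, if_pos hi]
        have hp := parent_bounds k i hk hi
        congr 1
        exact ih _ f2 (by omega) (by omega)
    · cases f2 with
      | zero => simp [ancWalk, hi]
      | succ f2 => simp [ancWalk, hi]

lemma ancestors_unfold (k i : Int) (hk : 1 ≤ k) (hi : 0 < i) :
    ancestors k i = ename (PySem.Int.floordiv (i-1) k) :: ancestors k (PySem.Int.floordiv (i-1) k) := by
  unfold ancestors
  obtain ⟨t, ht⟩ : ∃ t, i.toNat = t + 1 := ⟨i.toNat - 1, by omega⟩
  rw [ht]
  simp only [ancWalk, if_pos hi]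
  congr 1
  have hp := parent_bounds k i hk hi
  exact ancWalk_fuel k hk t _ _ (by omega) (by omega)

lemma ancestors_mem_aux (k : Int) (hk : 1 ≤ k) : ∀ (N : Nat) (i : Int), i.toNat ≤ N →
    ∀ x ∈ ancestors k i, ∃ p, 0 ≤ p ∧ p < i ∧ x = ename p := by
  intro N
  induction N with
  | zero =>
    intro i hi x hx
    have : i.toNat = 0 := by omega
    unfold ancestors at hx
    rw [this] at hx
    simp [ancWalk] at hx
  | succ N ih =>
    intro i hi x hx
    by_cases hpos : 0 < i
    · rw [ancestors_unfold k i hk hpos] at hx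
      have hp := parent_bounds k i hk hpos
      rcases List.mem_cons.mp hx with hx | hx
      · exact ⟨_, hp.1, by omega, hx⟩
      · obtain ⟨p, hp0, hp1, hp2⟩ := ih _ (by omega) x hx
        exact ⟨p, hp0, by omega, hp2⟩
    · unfold ancestors at hx
      have : i.toNat = 0 := by omega
      rw [this] at hx
      simp [ancWalk] at hx

lemma ancestors_mem (k : Int) (hk : 1 ≤ k) : ∀ (i : Int) (x : String), x ∈ ancestors k i →
    ∃ p, 0 ≤ p ∧ p < i ∧ x = ename p := by
  intro i x hx
  exact ancestors_mem_aux k hk i.toNat i le_rfl x hx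

lemma ancestors_nodup_aux (k : Int) (hk : 1 ≤ k) : ∀ (N : Nat) (i : Int), i.toNat ≤ N →
    (ancestors k i).Nodup := by
  intro N
  induction N with
  | zero =>
    intro i hi
    unfold ancestors
    have : i.toNat = 0 := by omega
    rw [this]
    simp [ancWalk]
  | succ N ih =>
    intro i hi
    by_cases hpos : 0 < i
    · rw [ancestors_unfold k i hk hpos]
      have hp := parent_bounds k i hk hpos
      refine List.nodup_cons.mpr ⟨?_, ih _ (by omega)⟩
      intro hmem
      obtain ⟨p, hp0, hp1, hp2⟩ := ancestors_mem k hk _ _ hmem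
      have := ename_inj _ _ hp.1 hp0 hp2
      omega
    · unfold ancestors
      have : i.toNat = 0 := by omega
      rw [this]
      simp [ancWalk]

lemma ancestors_nodup (k : Int) (hk : 1 ≤ k) : ∀ (i : Int), (ancestors k i).Nodup := by
  intro i
  exact ancestors_nodup_aux k hk i.toNat i le_rfl

lemma ancestors_child (k m j : Int) (hk : 1 ≤ k) (hm : 0 ≤ m) (hj0 : 0 ≤ j) (hjk : j < k) :
    ancestors k (1 + k*m + j) = ename m :: ancestors k m := by
  have hkm : 0 ≤ k * m := mul_nonneg (by omega) hm
  rw [ancestors_unfold k _ hk (by omega)]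
  have hdiv : PySem.Int.floordiv (1 + k*m + j - 1) k = m := by
    rw [show (1 + k*m + j - 1 : Int) = k*m + j by ring]
    rw [PySem.Int.floordiv_eq_iff_of_pos (by omega)]
    constructor
    · nlinarith
    · nlinarith
  rw [hdiv]

-- ---- Nint bracket ----
lemma Nint_bracket (k size : Int) (hk : 1 ≤ k) (hs : 1 < size) :
    (Nint k size - 1) * k < size - 1 ∧ size - 1 ≤ (Nint k size) * k := by
  have h : Nint k size = -PySem.Int.floordiv (-(size - 1)) k := by
    unfold Nint
    rw [if_neg (by omega)]
    congr 2
    ring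
  exact (PySem.Int.neg_floordiv_neg_eq_iff_of_pos (by omega)).mp h.symm

lemma Nint_nonneg (k size : Int) (hk : 1 ≤ k) : 0 ≤ Nint k size := by
  by_cases hs : size ≤ 1
  · unfold Nint; rw [if_pos hs]
  · have hb := (Nint_bracket k size hk (by omega)).2
    nlinarith

-- ---- B's build loop ----
lemma foldlB_run (k n : Int) : ∀ (bn : Nat),
    (PySem.List.pyRange 0 (bn : Int) 1).foldl
      (fun (st : PySem.Dict String (List String) × PySem.Dict String (List String)) i =>
        let hd := if i < n then
            st.1.insert (ename i) ((PySem.List.pyRange 1 (k+1) 1).map (fun j => ename (k*i+j)))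
          else st.1.insert (ename i) []
        let sd := st.2.insert (ename i) (ancestors k i)
        (hd, sd)) (PySem.Dict.empty, PySem.Dict.empty)
    = (mkD (hfB k n) (bn : Int), mkD (ancestors k) (bn : Int)) := by
  intro bn
  induction bn with
  | zero =>
    have h0 : ∀ f : Int → List String, mkD f 0 = PySem.Dict.empty := by
      intro f
      unfold mkD
      rw [PySem.List.pyRange_one_eq_nil le_rfl]
      rfl
    rw [show ((0:Nat) : Int) = 0 from rfl, PySem.List.pyRange_one_eq_nil le_rfl]
    simp only [List.foldl_nil]
    rw [h0, h0]
  | succ bn ih =>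
    have hb : (0:Int) ≤ (bn : Int) := by positivity
    rw [show ((bn+1:Nat) : Int) = (bn : Int) + 1 by push_cast; ring,
      PySem.List.pyRange_one_succ_right hb, List.foldl_append, ih]
    simp only [List.foldl_cons, List.foldl_nil]
    refine Prod.ext ?_ ?_
    · show (if (bn:Int) < n then _ else _) = _
      by_cases h : (bn : Int) < n
      · rw [if_pos h]
        rw [show ((PySem.List.pyRange 1 (k+1) 1).map (fun j => ename (k*(bn:Int)+j)))
            = childPre k (bn:Int) k from rfl]
        rw [insert_mkD_top _ _ _ hb]
        apply mkD_congr
        intro i hi0 hi1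
        by_cases hib : i = (bn:Int)
        · subst hib
          simp [hfB, h]
        · simp [hib, hfB]
      · rw [if_neg h]
        rw [insert_mkD_top _ _ _ hb]
        apply mkD_congr
        intro i hi0 hi1
        by_cases hib : i = (bn:Int)
        · subst hib
          simp [hfB, h]
        · simp [hib, hfB]
    · show (mkD (ancestors k) (bn:Int)).insert (ename (bn:Int)) (ancestors k (bn:Int)) = _
      rw [insert_mkD_top _ _ _ hb]
      apply mkD_congr
      intro i hi0 hi1
      by_cases hib : i = (bn:Int)
      · subst hib
        simp
      · simp [hib]

-- ---- A's inner loop ----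
lemma genSubLoop_run (k m : Int) (hk : 1 ≤ k) (hm : 0 ≤ m) : ∀ (fuel : Nat) (j : Int),
    0 ≤ j → j ≤ k → (k - j).toNat < fuel →
    genSubLoop k fuel (mkD (hfA k m j) (1+k*m+j)) (mkD (ancestors k) (1+k*m+j))
        ((PySem.List.pyRange 0 (1+k*m+j) 1).map ename) (ename m)
        ((PySem.List.pyRange (m+1) (1+k*m+j) 1).map ename) (1+k*m+j)
    = (mkD (hfA k m k) (1+k*m+k), mkD (ancestors k) (1+k*m+k),
       (PySem.List.pyRange 0 (1+k*m+k) 1).map ename,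
       (PySem.List.pyRange (m+1) (1+k*m+k) 1).map ename, 1+k*m+k) := by
  intro fuel
  induction fuel with
  | zero => intro j hj0 hjk hf; omega
  | succ fuel ih =>
    intro j hj0 hjk hf
    have hkm : 0 ≤ k * m := mul_nonneg (by omega) hm
    have hmlt : m < 1 + k*m + j := by nlinarith
    have hB0 : (0:Int) ≤ 1 + k*m + j := by omega
    have hgd : (mkD (hfA k m j) (1+k*m+j)).getD (ename m) [] = childPre k m j := by
      rw [getD_mkD _ _ _ _ hm hmlt]
      unfold hfA
      rw [if_neg (lt_irrefl m), if_pos rfl]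
    simp only [genSubLoop]
    rw [hgd, length_childPre k m j hj0]
    by_cases hjlt : j < k
    · rw [if_pos (show ((j.toNat : Int)) < k by omega)]
      -- hierachy_dict updates
      rw [childPre_snoc k m j hj0]
      rw [insert_mkD_mem _ _ m _ hm hmlt]
      rw [insert_mkD_top _ _ _ hB0]
      have hhd : mkD (fun i => if i = 1+k*m+j then [] else
          if i = m then childPre k m (j+1) else hfA k m j i) (1+k*m+j+1)
          = mkD (hfA k m (j+1)) (1+k*m+j+1) := by
        apply mkD_congr
        intro i hi0 hi1
        by_cases hiB : i = 1+k*m+j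
        · subst hiB
          simp [hfA, show ¬ (1+k*m+j < m) by omega, show ¬ (1+k*m+j = m) by omega]
        · rw [if_neg hiB]
          by_cases him : i = m
          · subst him
            simp [hfA]
          · simp [hfA, him]
      rw [hhd]
      -- sub_ordinates updates
      rw [insert_mkD_top _ _ _ hB0]
      have hgd2 : (mkD (fun i => if i = 1+k*m+j then [ename m] else ancestors k i)
          (1+k*m+j+1)).getD (ename m) [] = ancestors k m := by
        rw [getD_mkD _ _ _ _ hm (by omega)]
        simp [show ¬ (m = 1+k*m+j) by omega]
      rw [hgd2]
      rw [foldl_subAppend (ename (1+k*m+j)) (ancestors k m) _ [ename m]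
        (nodup_keys_mkD _ _) ?hget (ancestors_nodup k hk m) ?hnacc ?hnnn]
      case hget =>
        rw [get?_mkD _ _ _ (by omega) (by omega)]
        simp
      case hnacc =>
        intro x hx
        obtain ⟨p, hp0, hp1, hp2⟩ := ancestors_mem k hk m x hx
        simp only [List.mem_singleton]
        intro hc
        rw [hp2] at hc
        have := ename_inj p m hp0 hm hc
        omega
      case hnnn =>
        intro x hx
        obtain ⟨p, hp0, hp1, hp2⟩ := ancestors_mem k hk m x hx
        rw [hp2]
        intro hc
        have := ename_inj p _ hp0 hB0 hc
        omega
      rw [insert_mkD_mem _ _ (1+k*m+j) _ hB0 (by omega)]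
      have hsd : mkD (fun i => if i = 1+k*m+j then [ename m] ++ ancestors k m else
          if i = 1+k*m+j then [ename m] else ancestors k i) (1+k*m+j+1)
          = mkD (ancestors k) (1+k*m+j+1) := by
        apply mkD_congr
        intro i hi0 hi1
        by_cases hiB : i = 1+k*m+j
        · subst hiB
          rw [if_pos rfl]
          rw [ancestors_child k m j hk hm hj0 hjlt]
          rfl
        · rw [if_neg hiB, if_neg hiB]
      rw [hsd]
      -- employees and queue
      have hemp : (PySem.List.pyRange 0 (1+k*m+j) 1).map ename ++ [ename (1+k*m+j)]
          = (PySem.List.pyRange 0 (1+k*m+j+1) 1).map ename := by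
        rw [PySem.List.pyRange_one_succ_right hB0, List.map_append]
        rfl
      have hq : (PySem.List.pyRange (m+1) (1+k*m+j) 1).map ename ++ [ename (1+k*m+j)]
          = (PySem.List.pyRange (m+1) (1+k*m+j+1) 1).map ename := by
        rw [PySem.List.pyRange_one_succ_right (show m+1 ≤ 1+k*m+j by omega), List.map_append]
        rfl
      rw [hemp, hq]
      have harr : (1+k*m+j+1 : Int) = 1+k*m+(j+1) := by ring
      rw [harr]
      exact ih (j+1) (by omega) (by omega) (by omega)
    · rw [if_neg (show ¬ ((j.toNat : Int)) < k by omega)]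
      have : j = k := by omega
      subst this
      rfl

-- ---- A's outer loop ----
lemma exit_Nint (k size m : Int) (hk : 1 ≤ k) (hm0 : 0 ≤ m) (hmN : m ≤ Nint k size)
    (hexit : size ≤ 1 + k*m) : m = Nint k size := by
  by_cases hs : size ≤ 1
  · have h0 : Nint k size = 0 := by unfold Nint; rw [if_pos hs]
    omega
  · have hb := Nint_bracket k size hk (by omega)
    by_contra hne
    have hlt : m ≤ Nint k size - 1 := by omega
    have h2 : m * k ≤ (Nint k size - 1) * k :=
      mul_le_mul_of_nonneg_right hlt (by omega)
    nlinarith [hb.1]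

lemma hgLoop_run (k size : Int) (hk : 1 ≤ k) : ∀ (fuel : Nat) (m : Int),
    0 ≤ m → m ≤ Nint k size → (size - (1+k*m)).toNat ≤ fuel →
    hgLoop k size fuel (mkD (hfA k m 0) (1+k*m)) (mkD (ancestors k) (1+k*m))
        ((PySem.List.pyRange 0 (1+k*m) 1).map ename)
        ((PySem.List.pyRange m (1+k*m) 1).map ename) (1+k*m)
    = (mkD (hfA k (Nint k size) 0) (1+k*(Nint k size)), mkD (ancestors k) (1+k*(Nint k size)),
       (PySem.List.pyRange 0 (1+k*(Nint k size)) 1).map ename, 1+k*(Nint k size)) := by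
  intro fuel
  induction fuel with
  | zero =>
    intro m hm0 hmN hf
    have hkm : 0 ≤ k * m := mul_nonneg (by omega) hm0
    have hmNe : m = Nint k size := exit_Nint k size m hk hm0 hmN (by omega)
    subst hmNe
    rfl
  | succ fuel ih =>
    intro m hm0 hmN hf
    have hkm : 0 ≤ k * m := mul_nonneg (by omega) hm0
    have hmk : m ≤ k * m := le_mul_of_one_le_left hm0 hk
    by_cases hlt : 1 + k*m < size
    · have hq : (PySem.List.pyRange m (1+k*m) 1).map ename
          = ename m :: (PySem.List.pyRange (m+1) (1+k*m) 1).map ename := by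
        rw [PySem.List.pyRange_one_cons (show m < 1+k*m by omega)]
        rfl
      rw [hq]
      simp only [hgLoop, if_pos hlt]
      have hgs := genSubLoop_run k m hk hm0 (k.toNat+1) 0 le_rfl (by omega) (by omega)
      simp only [add_zero] at hgs
      simp only [generate_sub_ordinates]
      rw [hgs]
      have hstep : mkD (hfA k m k) (1+k*m+k) = mkD (hfA k (m+1) 0) (1+k*m+k) := by
        apply mkD_congr
        intro i hi0 hi1
        unfold hfA
        by_cases h1 : i < m
        · rw [if_pos h1, if_pos (by omega : i < m+1)]
        · by_cases h2 : i = m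
          · subst h2
            rw [if_neg h1, if_pos rfl, if_pos (by omega : i < i+1)]
          · rw [if_neg h1, if_neg h2, if_neg (by omega : ¬ i < m+1)]
            by_cases h3 : i = m+1
            · rw [if_pos h3, childPre_zero]
            · rw [if_neg h3]
      have harr : (1+k*m+k : Int) = 1+k*(m+1) := by ring
      rw [hstep, harr]
      have hmN2 : m + 1 ≤ Nint k size := by
        by_contra hc
        have hme : m = Nint k size := by omega
        have hb := Nint_bracket k size hk (by omega)
        rw [hme] at hlt
        nlinarith [hb.2]
      have hfuel : (size - (1+k*(m+1))).toNat ≤ fuel := by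
        have hfe : size - (1+k*(m+1)) = size - (1+k*m) - k := by ring
        rw [hfe]
        omega
      exact ih (m+1) (by omega) hmN2 hfuel
    · simp only [hgLoop, if_neg hlt]
      have hmNe : m = Nint k size := exit_Nint k size m hk hm0 hmN (by omega)
      subst hmNe
      rfl

lemma mkD_one (f : Int → List String) : mkD f 1 = PySem.Dict.mk [(ename 0, f 0)] := by
  unfold mkD
  rw [show PySem.List.pyRange 0 1 1 = [0] by decide]
  rfl

lemma init_dict (v : List String) :
    (PySem.Dict.empty : PySem.Dict String (List String)).insert (ename 0) v
      = PySem.Dict.mk [(ename 0, v)] := by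
  apply PySem.Dict.ext
  rw [PySem.Dict.items_insert_of_not_contains]
  · rfl
  · rfl

lemma hfA_hfB (k n : Int) :
    mkD (hfA k n 0) (1+k*n) = mkD (hfB k n) (1+k*n) := by
  apply mkD_congr
  intro i hi0 hi1
  unfold hfA hfB
  by_cases h1 : i < n
  · rw [if_pos h1, if_pos h1]
  · rw [if_neg h1, if_neg h1]
    by_cases h2 : i = n
    · rw [if_pos h2, childPre_zero]
    · rw [if_neg h2]

lemma alt_closed (k size : Int) (hI : 0 ≤ 1 + k * Nint k size) :
    hierachy_generator_alt k size
      = ((mkD (hfB k (Nint k size)) (1+k*(Nint k size))).items,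
         (mkD (ancestors k) (1+k*(Nint k size))).items,
         (PySem.List.pyRange 0 (1+k*(Nint k size)) 1).map (fun i => ename i),
         1+k*(Nint k size)) := by
  have hfold := foldlB_run k (Nint k size) ((1+k*(Nint k size)).toNat)
  rw [Int.toNat_of_nonneg hI] at hfold
  show (((PySem.List.pyRange 0 (1+k*(Nint k size)) 1).foldl
      (fun (st : PySem.Dict String (List String) × PySem.Dict String (List String)) i =>
        let hd := if i < Nint k size then
            st.1.insert (ename i) ((PySem.List.pyRange 1 (k+1) 1).map (fun j => ename (k*i+j)))
          else st.1.insert (ename i) []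
        let sd := st.2.insert (ename i) (ancestors k i)
        (hd, sd)) (PySem.Dict.empty, PySem.Dict.empty)).1.items,
      ((PySem.List.pyRange 0 (1+k*(Nint k size)) 1).foldl
      (fun (st : PySem.Dict String (List String) × PySem.Dict String (List String)) i =>
        let hd := if i < Nint k size then
            st.1.insert (ename i) ((PySem.List.pyRange 1 (k+1) 1).map (fun j => ename (k*i+j)))
          else st.1.insert (ename i) []
        let sd := st.2.insert (ename i) (ancestors k i)
        (hd, sd)) (PySem.Dict.empty, PySem.Dict.empty)).2.items,
      (PySem.List.pyRange 0 (1+k*(Nint k size)) 1).map (fun i => ename i),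
      (1+k*(Nint k size) : Int)) = _
  rw [hfold]

lemma a_closed (k size : Int) :
    hierachy_generator k size
      = ((hgLoop k size (size.toNat+1) (PySem.Dict.mk [(ename 0, [])])
            (PySem.Dict.mk [(ename 0, [])]) [ename 0] [ename 0] 1).1.items,
         (hgLoop k size (size.toNat+1) (PySem.Dict.mk [(ename 0, [])])
            (PySem.Dict.mk [(ename 0, [])]) [ename 0] [ename 0] 1).2.1.items,
         (hgLoop k size (size.toNat+1) (PySem.Dict.mk [(ename 0, [])])
            (PySem.Dict.mk [(ename 0, [])]) [ename 0] [ename 0] 1).2.2.1,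
         (hgLoop k size (size.toNat+1) (PySem.Dict.mk [(ename 0, [])])
            (PySem.Dict.mk [(ename 0, [])]) [ename 0] [ename 0] 1).2.2.2) := by
  show ((hgLoop k size (size.toNat+1) (PySem.Dict.empty.insert (ename 0) [])
            (PySem.Dict.empty.insert (ename 0) []) [ename 0] [ename 0] (0+1)).1.items,
         (hgLoop k size (size.toNat+1) (PySem.Dict.empty.insert (ename 0) [])
            (PySem.Dict.empty.insert (ename 0) []) [ename 0] [ename 0] (0+1)).2.1.items,
         (hgLoop k size (size.toNat+1) (PySem.Dict.empty.insert (ename 0) [])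
            (PySem.Dict.empty.insert (ename 0) []) [ename 0] [ename 0] (0+1)).2.2.1,
         (hgLoop k size (size.toNat+1) (PySem.Dict.empty.insert (ename 0) [])
            (PySem.Dict.empty.insert (ename 0) []) [ename 0] [ename 0] (0+1)).2.2.2) = _
  rw [init_dict, show ((0:Int)+1) = 1 from by norm_num]

-- ===== VERDICT (by name: the statement is the Claim_ definition above) =====
theorem hierachy_generator_spec : Claim_equal_hierachy_generator := by
  unfold Claim_equal_hierachy_generator
  intro k size _dom pre
  unfold Spec_hierachy_generator
  by_cases hs : size ≤ 1
  · have hN : Nint k size = 0 := by unfold Nint; rw [if_pos hs]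
    have halt := alt_closed k size (by rw [hN]; simp)
    rw [hN] at halt
    simp only [mul_zero, add_zero] at halt
    rw [a_closed, halt]
    simp only [hgLoop, if_neg (show ¬ ((1:Int) < size) by omega)]
    rw [mkD_one, mkD_one, show PySem.List.pyRange 0 1 1 = [0] by decide]
    simp [hfB, ancestors, ancWalk]
  · have hk : 1 ≤ k := by
      rcases pre with hk | hs'
      · exact hk
      · omega
    have hNn := Nint_nonneg k size hk
    have hkN : 0 ≤ k * Nint k size := mul_nonneg (by omega) hNn
    have halt := alt_closed k size (by omega)
    have hrun := hgLoop_run k size hk (size.toNat + 1) 0 le_rfl hNn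
      (by simp only [mul_zero, add_zero]; omega)
    simp only [mul_zero, add_zero] at hrun
    rw [show PySem.List.pyRange 0 1 1 = [0] by decide] at hrun
    simp only [List.map_cons, List.map_nil] at hrun
    have e1 : PySem.Dict.mk [(ename 0, ([] : List String))] = mkD (hfA k 0 0) 1 := by
      rw [mkD_one]
      rw [show hfA k 0 0 0 = [] by
        unfold hfA; rw [if_neg (lt_irrefl 0), if_pos rfl, childPre_zero]]
    have e2 : PySem.Dict.mk [(ename 0, ([] : List String))] = mkD (ancestors k) 1 := by
      rw [mkD_one]
      rfl
    rw [← e1, ← e2] at hrun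
    rw [a_closed, halt, hrun, hfA_hfB k (Nint k size)]
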